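-- pv_equiv track=rewrite | github.com/kpersand2025/AesCLO | backend/utils/weather_outfit_generator.py | is_temp_range_compatible
-- ===== SOURCE A (Python) =====
-- def get_adjacent_temp_ranges(temp_range):
--     """
--     Get adjacent temperature ranges
--
--     Args:
--         temp_range (str): Temperature range
--
--     Returns:
--         list: List of adjacent temperature ranges
--     """
--     temp_ranges = ["cold", "cool", "warm", "hot"]
--     idx = temp_ranges.index(temp_range)
--     adjacent = []
--
--     if idx > 0:
--         adjacent.append(temp_ranges[idx - 1])
--     if idx < len(temp_ranges) - 1:
--         adjacent.append(temp_ranges[idx + 1])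
--
--     return adjacent
--
-- def is_temp_range_compatible(item_temp_ranges, current_temp_range):
--     """
--     Check if an item's temperature ranges are compatible with the current temperature
--     Much stricter for cold weather - only cold-tagged items for cold weather
--
--     Args:
--         item_temp_ranges (list): Item's temperature range tags
--         current_temp_range (str): Current temperature range
--
--     Returns:
--         bool: True if compatible, False if specifically incompatible
--     """
--     # If item has no temperature tags, assume it's compatible
--     if not item_temp_ranges:
--         return True
--
--     # For cold temperatures (0-39°F), ONLY allow items tagged for cold
--     if current_temp_range == "cold":
--         return "cold" in item_temp_ranges
--
--     # Check if current temperature range is in item's ranges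
--     if current_temp_range in item_temp_ranges:
--         return True
--
--     # For non-cold temperatures, check for adjacent compatibility
--     adjacent_ranges = get_adjacent_temp_ranges(current_temp_range)
--     for adj_range in adjacent_ranges:
--         if adj_range in item_temp_ranges:
--             # For hot temperatures, don't consider cool as adjacent
--             if current_temp_range == "hot" and adj_range == "cool":
--                 return False
--             return True
--
--     # Special case - cold/cool are incompatible with hot
--     if current_temp_range == "hot" and set(item_temp_ranges).intersection({"cold", "cool"}):
--         return False
--
--     # Special case - hot items are incompatible with cold
--     if current_temp_range == "cold" and "hot" in item_temp_ranges:
--         return False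
--
--     # Default to incompatible
--     return False
-- ===== SOURCE B (Python) =====
-- ALLOWED = {
--     "cold": ["cold"],
--     "cool": ["cold", "cool", "warm"],
--     "warm": ["cool", "warm", "hot"],
--     "hot": ["warm", "hot"],
-- }
--
-- def is_temp_range_compatible(item_temp_ranges, current_temp_range):
--     if not item_temp_ranges:
--         return True
--     if current_temp_range in item_temp_ranges:
--         return True
--     return any(t in item_temp_ranges for t in ALLOWED[current_temp_range])
-- ===== Notes on version B (the rewrite author's own statement) =====
-- stated objective: simpler
-- what changed: Replaces the adjacency-computing helper, the early cold-only branch, the adjacency loop and the two dead special-case branches with a single static compatibility table ALLOWED and one any() membership scan.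
import Mathlib
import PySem

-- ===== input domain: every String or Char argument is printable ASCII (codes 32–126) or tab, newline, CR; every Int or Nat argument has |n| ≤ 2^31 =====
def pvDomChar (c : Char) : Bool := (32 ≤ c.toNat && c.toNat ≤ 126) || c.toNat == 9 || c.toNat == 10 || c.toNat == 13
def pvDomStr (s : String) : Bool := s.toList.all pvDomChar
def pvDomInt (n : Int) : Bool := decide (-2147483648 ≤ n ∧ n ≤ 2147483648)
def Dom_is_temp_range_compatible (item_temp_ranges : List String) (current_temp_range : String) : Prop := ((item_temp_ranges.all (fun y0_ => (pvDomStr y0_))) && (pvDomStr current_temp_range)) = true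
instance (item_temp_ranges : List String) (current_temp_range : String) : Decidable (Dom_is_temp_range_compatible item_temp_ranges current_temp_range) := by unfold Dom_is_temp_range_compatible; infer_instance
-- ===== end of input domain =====

-- B replaces the adjacency helper and branch cascade with one static compatibility table (objective: simpler).
-- ===== PORT A =====
-- helper: returns none where Python's list.index raises ValueError
def get_adjacent_temp_ranges (temp_range : String) : Option (List String) :=
  let temp_ranges : List String := ["cold", "cool", "warm", "hot"]
  match PySem.List.index? temp_ranges temp_range with
  | none => none
  | some idx =>
    let adjacent : List String := []
    let adjacent := if idx > 0 then adjacent ++ [temp_ranges.getD (idx - 1) ""] else adjacent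
    let adjacent := if idx < temp_ranges.length - 1 then adjacent ++ [temp_ranges.getD (idx + 1) ""] else adjacent
    some adjacent

-- the 'for adj_range in adjacent' loop with its early returns; none = loop fell through
def pvAdjLoop (item_temp_ranges : List String) (current_temp_range : String) : List String → Option Bool
  | [] => none
  | adj_range :: rest =>
    if item_temp_ranges.contains adj_range then
      if current_temp_range == "hot" && adj_range == "cool" then some false else some true
    else pvAdjLoop item_temp_ranges current_temp_range rest

def is_temp_range_compatible (item_temp_ranges : List String) (current_temp_range : String) : Bool :=
  if item_temp_ranges.isEmpty then true
  else if current_temp_range == "cold" then item_temp_ranges.contains "cold"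
  else if item_temp_ranges.contains current_temp_range then true
  else
    match get_adjacent_temp_ranges current_temp_range with
    | none => false  -- ValueError: excluded by Pre_
    | some adjacent_ranges =>
      match pvAdjLoop item_temp_ranges current_temp_range adjacent_ranges with
      | some b => b
      | none =>
        if current_temp_range == "hot" &&
            !(PySem.Set.inter (PySem.Set.ofList item_temp_ranges) ["cold", "cool"]).isEmpty then false
        else if current_temp_range == "cold" && item_temp_ranges.contains "hot" then false
        else false

-- ===== PORT B =====
def ALLOWED : PySem.Dict String (List String) := PySem.Dict.ofList
  [("cold", ["cold"]), ("cool", ["cold", "cool", "warm"]),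
   ("warm", ["cool", "warm", "hot"]), ("hot", ["warm", "hot"])]

def is_temp_range_compatible_alt (item_temp_ranges : List String) (current_temp_range : String) : Bool :=
  if item_temp_ranges.isEmpty then true
  else if item_temp_ranges.contains current_temp_range then true
  else
    match PySem.Dict.get? ALLOWED current_temp_range with
    | none => false  -- KeyError: excluded by Pre_
    | some ts => ts.any (fun t => item_temp_ranges.contains t)

-- ===== PRECONDITION & SPEC =====
-- Pre_ excludes exactly the inputs on which A raises ValueError (and B raises KeyError):
-- a nonempty item list with a current range outside the four known tags and not among the item tags.
def Pre_is_temp_range_compatible (item_temp_ranges : List String) (current_temp_range : String) : Prop :=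
  item_temp_ranges = [] ∨ current_temp_range ∈ (["cold", "cool", "warm", "hot"] : List String) ∨
    current_temp_range ∈ item_temp_ranges
instance (item_temp_ranges : List String) (current_temp_range : String) : Decidable (Pre_is_temp_range_compatible item_temp_ranges current_temp_range) := by unfold Pre_is_temp_range_compatible; infer_instance

def pvWitness_is_temp_range_compatible : List String × String := (["warm", "hot"], "cool")

def Spec_is_temp_range_compatible (item_temp_ranges : List String) (current_temp_range : String) (out : Bool) : Prop := out = is_temp_range_compatible_alt item_temp_ranges current_temp_range
instance (item_temp_ranges : List String) (current_temp_range : String) (out : Bool) : Decidable (Spec_is_temp_range_compatible item_temp_ranges current_temp_range out) := by unfold Spec_is_temp_range_compatible; infer_instance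

-- ===== CLAIM (what is proved, stated in full; the proofs are below) =====
def Claim_equal_is_temp_range_compatible : Prop := ∀ (item_temp_ranges : List String) (current_temp_range : String), Dom_is_temp_range_compatible item_temp_ranges current_temp_range → Pre_is_temp_range_compatible item_temp_ranges current_temp_range → Spec_is_temp_range_compatible item_temp_ranges current_temp_range (is_temp_range_compatible item_temp_ranges current_temp_range)

-- ===== LEMMAS AND PROOFS =====
theorem adj_cold : get_adjacent_temp_ranges "cold" = some ["cool"] := by decide
theorem adj_cool : get_adjacent_temp_ranges "cool" = some ["cold", "warm"] := by decide
theorem adj_warm : get_adjacent_temp_ranges "warm" = some ["cool", "hot"] := by decide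
theorem adj_hot : get_adjacent_temp_ranges "hot" = some ["warm"] := by decide
theorem allowed_cold : PySem.Dict.get? ALLOWED "cold" = some ["cold"] := by decide
theorem allowed_cool : PySem.Dict.get? ALLOWED "cool" = some ["cold", "cool", "warm"] := by decide
theorem allowed_warm : PySem.Dict.get? ALLOWED "warm" = some ["cool", "warm", "hot"] := by decide
theorem allowed_hot : PySem.Dict.get? ALLOWED "hot" = some ["warm", "hot"] := by decide

theorem known_case (items : List String) (cur : String)
    (hc : cur ∈ (["cold", "cool", "warm", "hot"] : List String)) (hne : items ≠ []) :
    is_temp_range_compatible items cur = is_temp_range_compatible_alt items cur := by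
  fin_cases hc <;>
    simp only [is_temp_range_compatible, is_temp_range_compatible_alt,
      adj_cold, adj_cool, adj_warm, adj_hot,
      allowed_cold, allowed_cool, allowed_warm, allowed_hot,
      pvAdjLoop, List.isEmpty_iff, hne, if_false] <;>
    by_cases h1 : "cold" ∈ items <;>
    by_cases h2 : "cool" ∈ items <;>
    by_cases h3 : "warm" ∈ items <;>
    by_cases h4 : "hot" ∈ items <;>
    simp_all [PySem.Set.inter, PySem.Set.ofList, List.contains_eq_mem]

-- ===== VERDICT (by name: the statement is the Claim_ definition above) =====
theorem is_temp_range_compatible_spec : Claim_equal_is_temp_range_compatible := by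
  intro items cur _ hpre
  unfold Spec_is_temp_range_compatible
  rcases hpre with h | h | h
  · subst h; rfl
  · by_cases hne : items = []
    · subst hne; fin_cases h <;> rfl
    · exact known_case items cur h hne
  · have hne : items ≠ [] := by rintro rfl; simp at h
    by_cases hk : cur ∈ (["cold", "cool", "warm", "hot"] : List String)
    · exact known_case items cur hk hne
    · have hcold : (cur == "cold") = false := by
        simp only [List.mem_cons] at hk
        simp_all
      simp [is_temp_range_compatible, is_temp_range_compatible_alt, hne, hcold, h]
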